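-- pv_equiv track=rewrite | github.com/JohnSmith114/Advent_Of_Code_2018 | Day2/problem1.py | countOccurr
-- ===== SOURCE A (Python) =====
-- from collections import Counter
--
-- def countOccurr(ID):
-- 	twiceOccurr = 0
-- 	triceOccurr = 0
-- 	splitID = list(ID)
-- 	count = Counter(splitID)
-- 	for x in count.values():
-- 		if x == 2:
-- 			twiceOccurr = 1
-- 		if x == 3:
-- 			triceOccurr = 1
-- 	return (twiceOccurr, triceOccurr)
-- ===== SOURCE B (Python) =====
-- def countOccurr(ID):
--     s = sorted(ID)
--     twiceOccurr = 0
--     triceOccurr = 0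
--     i = 0
--     n = len(s)
--     while i < n:
--         j = i + 1
--         while j < n and s[j] == s[i]:
--             j += 1
--         run = j - i
--         if run == 2:
--             twiceOccurr = 1
--         if run == 3:
--             triceOccurr = 1
--         i = j
--     return (twiceOccurr, triceOccurr)
-- ===== Notes on version B (the rewrite author's own statement) =====
-- stated objective: alternative
-- what changed: Counts via sort-then-scan of equal runs (two-pointer run-length walk over sorted(ID)) instead of building a Counter hash map and iterating its values.
import Mathlib
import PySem

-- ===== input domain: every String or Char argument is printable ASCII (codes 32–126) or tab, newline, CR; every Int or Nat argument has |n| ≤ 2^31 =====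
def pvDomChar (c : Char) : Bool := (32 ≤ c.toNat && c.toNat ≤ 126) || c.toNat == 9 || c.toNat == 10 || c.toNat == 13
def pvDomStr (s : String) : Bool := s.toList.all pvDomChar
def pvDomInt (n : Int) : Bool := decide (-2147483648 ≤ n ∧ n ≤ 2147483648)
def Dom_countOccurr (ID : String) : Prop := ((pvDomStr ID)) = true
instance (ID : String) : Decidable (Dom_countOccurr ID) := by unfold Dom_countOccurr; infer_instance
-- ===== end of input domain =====

-- B counts by sorting the characters and scanning equal runs, instead of A's Counter hash map; an alternative algorithm, not claimed faster.

-- ===== PORT A =====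
-- A: build Counter(list(ID)), then for each value set the 2-flag / 3-flag.
def countOccurr (ID : String) : Int × Int :=
  let splitID := ID.toList
  let count := PySem.Dict.counter splitID
  count.values.foldl
    (fun acc x =>
      (if x == 2 then (1 : Int) else acc.1, if x == 3 then (1 : Int) else acc.2))
    (0, 0)

-- ===== PORT B =====
-- B's outer while loop: each step consumes one run of equal characters from the
-- sorted list (the inner 'while s[j] == s[i]' scan is the takeWhile/dropWhile pair).
def altRuns : List Char → Int × Int → Int × Int
  | [], acc => acc
  | c :: rest, acc =>
      let run : Int := 1 + (rest.takeWhile (fun d => d == c)).length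
      altRuns (rest.dropWhile (fun d => d == c))
        (if run == 2 then 1 else acc.1, if run == 3 then 1 else acc.2)
termination_by l => l.length
decreasing_by
  exact Nat.lt_succ_of_le (List.length_dropWhile_le _ _)

def countOccurr_alt (ID : String) : Int × Int :=
  altRuns (PySem.List.sorted ID.toList (fun c => c)) (0, 0)

-- ===== PRECONDITION & SPEC =====
def Spec_countOccurr (ID : String) (out : Int × Int) : Prop := out = countOccurr_alt ID
instance (ID : String) (out : Int × Int) : Decidable (Spec_countOccurr ID out) := by unfold Spec_countOccurr; infer_instance

-- ===== CLAIM (what is proved, stated in full; the proofs are below) =====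
def Claim_equal_countOccurr : Prop := ∀ (ID : String), Dom_countOccurr ID → Spec_countOccurr ID (countOccurr ID)

-- ===== LEMMAS AND PROOFS =====

-- A's value-loop: the flags end up 1 iff some value is 2 (resp. 3).
theorem foldl_flags (vs : List Int) (tw tr : Int) :
    vs.foldl (fun acc x =>
      (if x == 2 then (1 : Int) else acc.1, if x == 3 then (1 : Int) else acc.2)) (tw, tr)
    = (if vs.any (fun x => x == 2) then 1 else tw,
       if vs.any (fun x => x == 3) then 1 else tr) := by
  induction vs generalizing tw tr with
  | nil => simp
  | cons v vs ih =>
    simp only [List.foldl_cons, List.any_cons, ih]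
    by_cases h2 : v = 2 <;> by_cases h3 : v = 3 <;> simp [h2, h3]

-- A's result, characterised by counts in ID's character list.
theorem countOccurr_char (ID : String) :
    countOccurr ID =
      (if ID.toList.any (fun c => ((ID.toList.count c : Int)) == 2) then 1 else 0,
       if ID.toList.any (fun c => ((ID.toList.count c : Int)) == 3) then 1 else 0) := by
  unfold countOccurr
  rw [foldl_flags]
  have hv : (PySem.Dict.counter ID.toList).values
      = (PySem.Set.ofList ID.toList).map (fun k => ((ID.toList.count k : Int))) := by
    show (PySem.Dict.counter ID.toList).items.map (·.2) = _
    rw [PySem.Dict.items_counter]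
    simp
  rw [hv]
  have hany : ∀ m : Int,
      ((PySem.Set.ofList ID.toList).map (fun k => ((ID.toList.count k : Int)))).any
        (fun x => x == m)
      = ID.toList.any (fun c => ((ID.toList.count c : Int)) == m) := by
    intro m
    simp only [List.any_map, Function.comp_def]
    rw [Bool.eq_iff_iff]
    simp only [List.any_eq_true, PySem.Set.mem_ofList]
  rw [hany 2, hany 3]

-- one step of B's scan over a sorted list: the run is all occurrences of its head
theorem sorted_head_split (c : Char) (rest : List Char)
    (hs : (c :: rest).Pairwise (· ≤ ·)) :
    rest = rest.takeWhile (fun d => d == c) ++ rest.dropWhile (fun d => d == c)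
    ∧ (∀ d ∈ rest.takeWhile (fun d => d == c), d = c)
    ∧ c ∉ rest.dropWhile (fun d => d == c)
    ∧ (rest.dropWhile (fun d => d == c)).Pairwise (· ≤ ·) := by
  refine ⟨(List.takeWhile_append_dropWhile).symm, ?_, ?_, ?_⟩
  · intro d hd
    have := List.mem_takeWhile_imp hd
    simpa using this
  · intro hc
    rcases List.pairwise_cons.1 hs with ⟨hle, hp⟩
    -- elements of the dropWhile suffix are > c
    cases hdw : rest.dropWhile (fun d => d == c) with
    | nil => simp [hdw] at hc
    | cons e tl =>
      have hne : rest.dropWhile (fun d => d == c) ≠ [] := by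
        rw [hdw]; exact List.cons_ne_nil _ _
      have he' := List.head_dropWhile_not (fun d => d == c) (l := rest) hne
      have he : ¬ (e == c) = true := by
        simp only [hdw, List.head_cons] at he'
        exact fun h => by rw [h] at he'; cases he'
      have hnece : c ≠ e := fun h => he (by subst h; exact beq_self_eq_true c)
      have hce : c < e := by
        have hmem : e ∈ rest := by
          have : e ∈ rest.dropWhile (fun d => d == c) := by
            rw [hdw]; exact List.mem_cons_self
          exact (List.dropWhile_sublist _).mem this
        have : c ≤ e := hle e hmem
        exact lt_of_le_of_ne this hnece
      rw [hdw] at hc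
      rcases List.mem_cons.1 hc with hc | hc
      · exact absurd hc hnece
      · -- c in tl: but e ≤ every element of tl while c < e
        have hsub : (e :: tl).Pairwise (· ≤ ·) := by
          have : (rest.dropWhile (fun d => d == c)).Pairwise (· ≤ ·) :=
            List.Pairwise.sublist (List.dropWhile_sublist _) hp
          rwa [hdw] at this
        have : e ≤ c := (List.pairwise_cons.1 hsub).1 c hc
        exact absurd (lt_of_lt_of_le hce this) (lt_irrefl c)
  · rcases List.pairwise_cons.1 hs with ⟨_, hp⟩
    exact List.Pairwise.sublist (List.dropWhile_sublist _) hp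

-- B's scan on a sorted list sets the flags exactly like the count characterisation
theorem altRuns_char (ss : List Char) (hs : ss.Pairwise (· ≤ ·)) (tw tr : Int) :
    altRuns ss (tw, tr)
    = (if ss.any (fun c => ((ss.count c : Int)) == 2) then 1 else tw,
       if ss.any (fun c => ((ss.count c : Int)) == 3) then 1 else tr) := by
  induction hn : ss.length using Nat.strong_induction_on generalizing ss tw tr with
  | _ n ih =>
    cases ss with
    | nil => simp [altRuns]
    | cons c rest =>
      obtain ⟨hsplit, htake, hnotin, hpdrop⟩ := sorted_head_split c rest hs
      set t := rest.takeWhile (fun d => d == c) with ht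
      set r := rest.dropWhile (fun d => d == c) with hr
      have hlen : r.length < n := by
        subst hn
        calc r.length ≤ rest.length := List.length_dropWhile_le _ _
        _ < (c :: rest).length := by simp
      -- count of c in the whole list
      have hcount_c : (c :: rest).count c = 1 + t.length := by
        rw [List.count_cons_self]
        conv_lhs => rw [hsplit]
        rw [List.count_append]
        have h1 : t.count c = t.length := by
          rw [List.count_eq_length.2]
          intro d hd; exact (htake d hd).symm ▸ rfl
        have h2 : r.count c = 0 := List.count_eq_zero.2 hnotin
        omega
      -- counts of elements of r agree between the whole list and r
      have hcount_r : ∀ d ∈ r, (c :: rest).count d = r.count d := by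
        intro d hd
        have hdc : d ≠ c := fun h => hnotin (h ▸ hd)
        conv_lhs => rw [show (c :: rest) = c :: (t ++ r) from by rw [← hsplit]]
        rw [List.count_cons_of_ne (Ne.symm hdc), List.count_append]
        have : t.count d = 0 := List.count_eq_zero.2 (fun hdt => hdc (htake d hdt))
        omega
      -- the 'any' over the whole list splits into the head run and the suffix
      have hany : ∀ m : Int,
          (c :: rest).any (fun x => (((c :: rest).count x : Int)) == m)
          = ((((c :: rest).count c : Int) == m) || r.any (fun x => ((r.count x : Int)) == m)) := by
        intro m
        rw [Bool.eq_iff_iff]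
        simp only [List.any_eq_true, Bool.or_eq_true, beq_iff_eq]
        constructor
        · rintro ⟨x, hx, hcnt⟩
          rcases List.mem_cons.1 hx with hx | hx
          · exact Or.inl (hx ▸ hcnt)
          · rcases (by rw [hsplit] at hx; exact List.mem_append.1 hx : x ∈ t ∨ x ∈ r) with hx | hx
            · exact Or.inl ((htake x hx) ▸ hcnt)
            · refine Or.inr ⟨x, hx, ?_⟩
              rw [← hcount_r x hx]; exact hcnt
        · rintro (h | ⟨x, hx, hcnt⟩)
          · exact ⟨c, List.mem_cons_self, h⟩
          · refine ⟨x, List.mem_cons_of_mem _ ((List.dropWhile_sublist _).mem hx), ?_⟩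
            rw [hcount_r x hx]; exact hcnt
      -- unfold one step of altRuns
      have hstep : altRuns (c :: rest) (tw, tr)
          = altRuns r (if (1 + (t.length : Int)) == 2 then 1 else tw,
                       if (1 + (t.length : Int)) == 3 then 1 else tr) := by
        rw [altRuns]
      rw [hstep]
      rw [ih r.length hlen r hpdrop _ _ rfl]
      have hrun : ∀ m : Int, ((1 + (t.length : Int)) == m)
          = ((((c :: rest).count c : Int)) == m) := by
        intro m
        rw [hcount_c]
        push_cast
        rfl
      rw [hany 2, hany 3]
      have h2 := hrun 2
      have h3 := hrun 3
      rw [Prod.mk.injEq]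
      refine ⟨?_, ?_⟩
      · rw [← h2]
        cases hb : (1 + (t.length : Int)) == 2 <;>
          cases hb' : r.any (fun x => ((r.count x : Int)) == 2) <;>
          simp
      · rw [← h3]
        cases hb : (1 + (t.length : Int)) == 3 <;>
          cases hb' : r.any (fun x => ((r.count x : Int)) == 3) <;>
          simp

-- ===== VERDICT (by name: the statement is the Claim_ definition above) =====
theorem countOccurr_spec : Claim_equal_countOccurr := by
  intro ID _
  show countOccurr ID = countOccurr_alt ID
  rw [countOccurr_char]
  unfold countOccurr_alt
  rw [altRuns_char _ (by simpa using PySem.List.sorted_pairwise ID.toList (fun c => c))]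
  have hperm : (PySem.List.sorted ID.toList (fun c => c)).Perm ID.toList :=
    PySem.List.sorted_perm _ _ _
  have hany : ∀ m : Int,
      (PySem.List.sorted ID.toList (fun c => c)).any
        (fun c => (((PySem.List.sorted ID.toList (fun c => c)).count c : Int)) == m)
      = ID.toList.any (fun c => ((ID.toList.count c : Int)) == m) := by
    intro m
    rw [Bool.eq_iff_iff]
    simp only [List.any_eq_true, beq_iff_eq]
    constructor
    · rintro ⟨c, hc, h⟩
      refine ⟨c, hperm.mem_iff.1 hc, ?_⟩
      rw [← hperm.count_eq c]; exact h
    · rintro ⟨c, hc, h⟩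
      refine ⟨c, hperm.mem_iff.2 hc, ?_⟩
      rw [hperm.count_eq c]; exact h
  rw [hany 2, hany 3]
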